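-- pv_equiv track=rewrite | github.com/jfernsler/TinyElementsLib | src/tinyelements/tinyelements_thumbmaker.py | get_frame_list
-- ===== SOURCE A (Python) =====
-- from math import floor
--
-- def get_frame_list(all_frames, max_count=100):
--     frame_count = len(all_frames)
--
--     if frame_count <= max_count:
--         return all_frames
--
--     num_list = list(range(max_count))
--     result = []
--     for i, frame in enumerate(all_frames):
--         percent = floor(i / frame_count * 100)
--         if percent in num_list:
--             result.append(frame)
--             num_list.remove(percent)
--     return result
-- ===== SOURCE B (Python) =====
-- from math import floor
--
-- def get_frame_list(all_frames, max_count=100):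
--     frame_count = len(all_frames)
--     if frame_count <= max_count:
--         return all_frames
--     first_index = {}
--     for i in reversed(range(frame_count)):
--         first_index[floor(i / frame_count * 100)] = i
--     picks = sorted(i for p, i in first_index.items() if p < max_count)
--     return [all_frames[i] for i in picks]
-- ===== Notes on version B (the rewrite author's own statement) =====
-- stated objective: faster
-- what changed: B replaces A's single forward scan that tests and removes each frame's percent bucket from a shrinking num_list by three stages: a right-to-left pass that overwrites a dict entry per bucket so each bucket ends up holding its smallest frame index, a sort of the surviving in-range indices, and a final gather by indexing into all_frames.
import Mathlib
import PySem

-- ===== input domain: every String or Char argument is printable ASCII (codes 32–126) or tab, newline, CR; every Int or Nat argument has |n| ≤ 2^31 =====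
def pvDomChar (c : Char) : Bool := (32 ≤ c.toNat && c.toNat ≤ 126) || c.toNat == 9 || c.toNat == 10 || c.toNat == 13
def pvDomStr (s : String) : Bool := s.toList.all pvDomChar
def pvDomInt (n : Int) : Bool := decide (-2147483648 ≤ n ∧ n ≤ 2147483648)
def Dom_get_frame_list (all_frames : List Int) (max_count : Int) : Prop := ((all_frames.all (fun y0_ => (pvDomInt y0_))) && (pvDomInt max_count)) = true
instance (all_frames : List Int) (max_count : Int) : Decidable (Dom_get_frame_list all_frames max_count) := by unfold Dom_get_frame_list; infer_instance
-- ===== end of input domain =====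

-- B replaces A's forward scan with its shrinking bucket list by three stages: a right-to-left pass
-- overwriting a dict so each percent bucket keeps its smallest frame index, a sort of the surviving
-- in-range indices, and a gather by indexing (objective: faster, no per-frame bucket-list scan).
-- Both Pythons compute `floor(i / frame_count * 100)` in IEEE-754 doubles; pvPercent below is an
-- exact integer model of that double-precision expression (round-to-nearest-even at each step),
-- shared by both ports because both sources contain the identical expression.

-- ===== PORT A =====
-- round-to-nearest-even of a / b (b > 0)
def pvRneDiv (a b : Nat) : Nat :=
  let q := a / b
  let r := a % b
  if 2 * r < b then q else if b < 2 * r then q + 1 else if q % 2 = 0 then q else q + 1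

-- fl(i / n) as a pair (m, t) with value m / 2^t, m = 0 or 2^52 ≤ m < 2^53 (0 ≤ i < n)
def pvFdiv (i n : Nat) : Nat × Nat :=
  if i = 0 then (0, 0)
  else
    let s1 := (Nat.log2 n + 1) - (Nat.log2 i + 1)
    let s := if n ≤ i * 2 ^ s1 then s1 else s1 + 1
    let t := s + 52
    let m := pvRneDiv (i * 2 ^ t) n
    if m = 2 ^ 53 then (2 ^ 52, t - 1) else (m, t)

-- exact value of Python's floor(i / n * 100) (doubles: fl(fl(i/n) * 100), then floor)
def pvPercent (i n : Nat) : Nat :=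
  let p := pvFdiv i n
  let M := 100 * p.1
  if M = 0 then 0
  else
    let bl := Nat.log2 M + 1
    if bl ≤ 53 then M / 2 ^ p.2
    else pvRneDiv M (2 ^ (bl - 53)) / 2 ^ (p.2 - (bl - 53))

-- the `for i, frame in enumerate(all_frames)` loop of A, state = (num_list, result)
def pvLoopA (n : Nat) : List Int → Nat → List Int × List Int → List Int × List Int
  | [], _, st => st
  | frame :: rest, i, st =>
    let percent : Int := (pvPercent i n : Nat)
    if st.1.contains percent then
      pvLoopA n rest (i + 1) ((PySem.List.remove? st.1 percent).getD st.1, st.2 ++ [frame])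
    else
      pvLoopA n rest (i + 1) st

def get_frame_list (all_frames : List Int) (max_count : Int) : List Int :=
  let frame_count : Int := all_frames.length
  if frame_count ≤ max_count then all_frames
  else (pvLoopA all_frames.length all_frames 0 (PySem.List.pyRange 0 max_count 1, [])).2

-- ===== PORT B =====
-- the `for i in reversed(range(frame_count)): first_index[floor(...)] = i` loop of B
def pvLoopB (n : Nat) (idxs : List Nat) (d : PySem.Dict Int Int) : PySem.Dict Int Int :=
  idxs.foldl (fun d i => d.insert ((pvPercent i n : Nat) : Int) (i : Int)) d

def get_frame_list_alt (all_frames : List Int) (max_count : Int) : List Int :=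
  let frame_count : Int := all_frames.length
  if frame_count ≤ max_count then all_frames
  else
    let first_index := pvLoopB all_frames.length (List.range all_frames.length).reverse PySem.Dict.empty
    let picks := PySem.List.sorted
      ((first_index.items.filter (fun p => decide (p.1 < max_count))).map Prod.snd) (fun x => x) false
    -- all_frames[i]: i is always a valid index here, so the IndexError default is never taken
    picks.map (fun i => (PySem.List.pyGet? all_frames i).getD 0)

-- ===== PRECONDITION & SPEC =====
def Spec_get_frame_list (all_frames : List Int) (max_count : Int) (out : List Int) : Prop := out = get_frame_list_alt all_frames max_count
instance (all_frames : List Int) (max_count : Int) (out : List Int) : Decidable (Spec_get_frame_list all_frames max_count out) := by unfold Spec_get_frame_list; infer_instance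

-- ===== CLAIM (what is proved, stated in full; the proofs are below) =====
def Claim_equal_get_frame_list : Prop := ∀ (all_frames : List Int) (max_count : Int), Dom_get_frame_list all_frames max_count → Spec_get_frame_list all_frames max_count (get_frame_list all_frames max_count)

-- ===== LEMMAS AND PROOFS =====

-- the selection predicate both sides are shown to compute: frame i is kept iff its percent bucket
-- is below max_count and no earlier frame falls in the same bucket
def pvSel (n : Nat) (mc : Int) (i : Nat) : Bool :=
  decide (((pvPercent i n : Nat) : Int) < mc) &&
  decide (∀ j < i, pvPercent j n ≠ pvPercent i n)

theorem find?_range_eq_some (n : Nat) (q : Nat → Bool) (j : Nat) :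
    (List.range n).find? q = some j ↔ j < n ∧ q j = true ∧ ∀ i < j, q i = false := by
  induction n generalizing j with
  | zero => simp [List.range_zero]
  | succ n ih =>
    rw [List.range_succ, List.find?_append]
    cases h : (List.range n).find? q with
    | some j' =>
      simp only [Option.some_or]
      rw [ih j'] at h
      obtain ⟨hj', hq', hmin'⟩ := h
      constructor
      · intro hsome
        obtain rfl : j' = j := Option.some.inj hsome
        exact ⟨Nat.lt_succ_of_lt hj', hq', hmin'⟩
      · rintro ⟨hj, hq, hminj⟩
        have : j' = j := by
          rcases Nat.lt_trichotomy j j' with h1 | h1 | h1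
          · exact absurd hq (by simp [hmin' j h1])
          · omega
          · exact absurd hq' (by simp [hminj j' h1])
        rw [this]
    | none =>
      simp only [Option.none_or]
      have hall : ∀ i < n, q i = false := by
        intro i hi
        by_contra hq
        have : ∃ x ∈ List.range n, q x := ⟨i, List.mem_range.2 hi, by simpa using hq⟩
        rw [← List.find?_isSome] at this
        rw [h] at this; simp at this
      constructor
      · intro hfind
        have hq := List.find?_some hfind
        have hmem := List.mem_of_find?_eq_some hfind
        simp at hmem
        subst hmem
        exact ⟨Nat.lt_succ_self _, hq, hall⟩
      · rintro ⟨hj, hq, hminj⟩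
        have hjn : j = n := by
          rcases Nat.lt_succ_iff_lt_or_eq.1 hj with h1 | h1
          · exact absurd hq (by simp [hall j h1])
          · exact h1
        subst hjn
        simp [List.find?, hq]

-- B's dict maps each percent bucket to the first frame index falling in it
theorem pvLoopB_get? (n : Nat) :
    ∀ (k : Nat) (d : PySem.Dict Int Int) (p : Int),
      (pvLoopB n (List.range k).reverse d).get? p =
        (((List.range k).find? (fun j => ((pvPercent j n : Nat) : Int) == p)).map
          (fun j => (j : Int))).or (d.get? p) := by
  intro k
  induction k with
  | zero => intro d p; simp [pvLoopB]
  | succ k ih =>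
    intro d p
    rw [List.range_succ, List.reverse_append]
    simp only [List.reverse_singleton, List.singleton_append]
    have hstep : pvLoopB n (k :: (List.range k).reverse) d =
        pvLoopB n (List.range k).reverse (d.insert ((pvPercent k n : Nat) : Int) (k : Int)) := rfl
    rw [hstep, ih]
    rw [List.find?_append]
    cases hf : (List.range k).find? (fun j => ((pvPercent j n : Nat) : Int) == p) with
    | some j => simp
    | none =>
      simp only [Option.map, Option.or]
      by_cases hp : ((pvPercent k n : Nat) : Int) = p
      · rw [hp, PySem.Dict.get?_insert_self]
        simp [List.find?, hp]
      · rw [PySem.Dict.get?_insert_of_ne _ _ (fun h => hp h.symm)]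
        simp [List.find?, show (((pvPercent k n : Nat) : Int) == p) = false by simpa using hp]

-- A's loop returns exactly the frames at selected indices
theorem pvLoopA_inv (all_frames : List Int) (mc : Int) :
    ∀ (l : List Int) (i : Nat) (num res : List Int),
      l = all_frames.drop i → i + l.length = all_frames.length →
      num = (PySem.List.pyRange 0 mc 1).filter
        (fun x => decide (∀ j < i, ((pvPercent j all_frames.length : Nat) : Int) ≠ x)) →
      res = ((List.range i).filter (pvSel all_frames.length mc)).map (fun j => all_frames.getD j 0) →
      (pvLoopA all_frames.length l i (num, res)).2 =
        ((List.range all_frames.length).filter (pvSel all_frames.length mc)).map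
          (fun j => all_frames.getD j 0) := by
  intro l
  induction l with
  | nil =>
    intro i num res _ hlen _ h2
    have : i = all_frames.length := by simpa using hlen
    subst this
    simp only [pvLoopA]
    exact h2
  | cons frame rest ih =>
    intro i num res hdrop hlen h1 h2
    have hi : i < all_frames.length := by simp at hlen; omega
    have hgetE : all_frames[i]? = some frame := by
      have := congrArg (fun l => l[0]?) hdrop
      simpa [List.getElem?_drop] using this.symm
    have hget : all_frames[i]?.getD 0 = frame := by
      simp [hgetE]
    have hrest : rest = all_frames.drop (i + 1) := by
      have := congrArg List.tail hdrop
      simpa [List.tail_drop] using this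
    simp only [pvLoopA]
    set n := all_frames.length with hn
    set k : Int := ((pvPercent i n : Nat) : Int) with hk
    have hk0 : (0:Int) ≤ k := by positivity
    have hmemnum : ∀ x : Int, x ∈ num ↔ (0 ≤ x ∧ x < mc) ∧ ∀ j < i, ((pvPercent j n : Nat) : Int) ≠ x := by
      intro x
      rw [h1]
      simp [List.mem_filter, PySem.List.mem_pyRange_one, and_assoc]
    have hfreshiff : (∀ j < i, ((pvPercent j n : Nat) : Int) ≠ k) ↔
        (∀ j < i, pvPercent j n ≠ pvPercent i n) := by
      constructor
      · intro h j hj he; exact h j hj (by rw [hk, he])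
      · intro h j hj he; exact h j hj (Nat.cast_inj.mp (he.trans hk))
    by_cases hc : num.contains k
    · -- k still available: this is the first index of an in-range bucket
      rw [if_pos hc]
      have hkin : k ∈ num := by simpa [List.contains_eq_mem] using hc
      obtain ⟨⟨-, hklt⟩, hfresh⟩ := (hmemnum k).1 hkin
      have hsel : pvSel n mc i = true := by
        simp only [pvSel, Bool.and_eq_true, decide_eq_true_eq]
        exact ⟨by rw [← hk]; exact hklt, hfreshiff.1 hfresh⟩
      have hnd : num.Nodup := h1 ▸ (PySem.List.nodup_pyRange_one 0 mc).filter _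
      have hrem : (PySem.List.remove? num k).getD num = num.erase k := by
        rw [PySem.List.remove?_eq_some_erase num k hkin]; rfl
      rw [hrem]
      apply ih (i + 1)
      · exact hrest
      · simp at hlen ⊢; omega
      · rw [hnd.erase_eq_filter, h1, List.filter_filter]
        apply List.filter_congr
        intro x _
        by_cases hx : x = k
        · simp only [hx]
          simp
          exact ⟨i, Nat.le_refl i, hk.symm⟩
        · have heq : (∀ j ≤ i, ((pvPercent j n : Nat) : Int) ≠ x) ↔
              (∀ j < i, ((pvPercent j n : Nat) : Int) ≠ x) := by
            constructor
            · intro h j hj; exact h j (Nat.le_of_lt hj)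
            · intro h j hj
              rcases eq_or_lt_of_le hj with h' | h'
              · subst h'; rw [← hk]; exact fun he => hx he.symm
              · exact h j h'
          simp [heq, hx]
      · rw [List.range_succ, List.filter_append, List.map_append]
        simp [hsel, h2, List.getD]
        exact hget.symm
    · -- bucket out of range or already taken: frame skipped
      rw [if_neg hc]
      have hknot : k ∉ num := by simpa [List.contains_eq_mem] using hc
      have hnosel : pvSel n mc i = false := by
        rw [pvSel]
        by_cases hklt : k < mc
        · have hnf : ¬ (∀ j < i, pvPercent j n ≠ pvPercent i n) := by
            intro hf
            exact hknot ((hmemnum k).2 ⟨⟨hk0, hklt⟩, hfreshiff.2 hf⟩)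
          simp [hnf]
        · have : ¬ (((pvPercent i n : Nat) : Int) < mc) := by rw [← hk]; exact hklt
          simp [this]
      apply ih (i + 1)
      · exact hrest
      · simp at hlen ⊢; omega
      · rw [h1]
        apply List.filter_congr
        intro x hxmem
        have hx0 : 0 ≤ x ∧ x < mc := by
          have := (PySem.List.mem_pyRange_one).1 hxmem
          simpa using this
        by_cases hx : x = k
        · have hnot : ¬ (∀ j < i, ((pvPercent j n : Nat) : Int) ≠ x) := by
            intro hall
            exact hknot (hx ▸ (hmemnum x).2 ⟨hx0, hall⟩)
          simp [hnot]
          by_contra hne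
          exact hnot (fun j hj he => hne ⟨j, Nat.le_of_lt hj, he⟩)
        · have heq : (∀ j < i, ((pvPercent j n : Nat) : Int) ≠ x) ↔
              (∀ j ≤ i, ((pvPercent j n : Nat) : Int) ≠ x) := by
            constructor
            · intro h j hj
              rcases eq_or_lt_of_le hj with h' | h'
              · subst h'; rw [← hk]; exact fun he => hx he.symm
              · exact h j h'
            · intro h j hj; exact h j (Nat.le_of_lt hj)
          simp [heq]
      · rw [List.range_succ, List.filter_append, List.map_append]
        simp [hnosel, h2]

-- ===== VERDICT (by name: the statement is the Claim_ definition above) =====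
theorem get_frame_list_spec : Claim_equal_get_frame_list := by
  intro all_frames max_count _
  unfold Spec_get_frame_list get_frame_list get_frame_list_alt
  by_cases h : (all_frames.length : Int) ≤ max_count
  · simp [h]
  · simp only [h, if_false]
    set n := all_frames.length with hn
    set mc := max_count
    -- A's side: the loop computes the selected frames
    rw [pvLoopA_inv all_frames mc all_frames 0 _ _ (by simp) (by simp) (by simp) (by simp)]
    -- B's side
    set d := pvLoopB n (List.range n).reverse PySem.Dict.empty with hd
    have hget? : ∀ p, d.get? p =
        (((List.range n).find? (fun j => ((pvPercent j n : Nat) : Int) == p)).map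
          (fun j => (j : Int))) := by
      intro p
      rw [hd, pvLoopB_get?]
      simp
    have hnd : d.keys.Nodup := by
      rw [hd]
      exact PySem.Dict.nodup_keys_foldl_insert_key _ _ _ _ (by simp)
    have hfst : ∀ q ∈ d.items, ∃ j : Nat, q.2 = (j : Int) ∧ j < n ∧
        ((pvPercent j n : Nat) : Int) = q.1 ∧ ∀ i < j, pvPercent i n ≠ pvPercent j n := by
      intro q hq
      obtain ⟨k1, v1⟩ := q
      have hg : d.get? k1 = some v1 := PySem.Dict.get?_of_mem_items d hq hnd
      rw [hget?] at hg
      cases hf : (List.range n).find? (fun j => ((pvPercent j n : Nat) : Int) == k1) with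
      | none => rw [hf] at hg; exact absurd hg (by simp)
      | some j =>
        rw [hf] at hg
        have hgv : v1 = (j : Int) := by
          have := hg.symm
          simpa using this
        obtain ⟨hjn, hbeq, hmin⟩ := (find?_range_eq_some n _ j).1 hf
        refine ⟨j, hgv, hjn, by simpa using hbeq, ?_⟩
        intro i hi he
        have := hmin i hi
        rw [show pvPercent i n = pvPercent j n from he] at this
        simp at this
        exact this (by simpa using hbeq)
    set P := ((d.items.filter (fun p => decide (p.1 < mc))).map Prod.snd) with hP
    set T := (((List.range n).filter (pvSel n mc)).map (fun j : Nat => Int.ofNat j)) with hT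
    have hTpair : T.Pairwise (fun a b : Int => a < b) := by
      rw [hT]
      exact List.Pairwise.map _ (fun a b hab => Int.ofNat_lt.2 hab)
        (List.Pairwise.filter _ List.pairwise_lt_range)
    have hTnodup : T.Nodup := hTpair.imp (fun h => ne_of_lt h)
    have hitemsnd : d.items.Nodup := by
      have : (d.items.map Prod.fst).Nodup := by simpa [PySem.Dict.keys] using hnd
      exact this.of_map
    have hPnodup : P.Nodup := by
      rw [hP]
      refine List.Nodup.map_on ?_ (hitemsnd.filter _)
      intro q hq r hr hqr
      have hq' := (List.mem_filter.1 hq).1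
      have hr' := (List.mem_filter.1 hr).1
      obtain ⟨jq, hq2, -, hq1, -⟩ := hfst q hq'
      obtain ⟨jr, hr2, -, hr1, -⟩ := hfst r hr'
      have : q.1 = r.1 := by
        rw [← hq1, ← hr1]
        have : jq = jr := by
          have := hq2.symm.trans (hqr.trans hr2)
          exact_mod_cast this
        rw [this]
      exact Prod.ext this hqr
    have hmem : ∀ v : Int, v ∈ T ↔ v ∈ P := by
      intro v
      constructor
      · -- selected index j: its bucket's dict entry is exactly j
        rw [hT, hP]
        intro hv
        obtain ⟨j, hjf, rfl⟩ := List.mem_map.1 hv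
        have hjr := List.mem_range.1 (List.mem_filter.1 hjf).1
        have hjsel := (List.mem_filter.1 hjf).2
        simp only [pvSel, Bool.and_eq_true, decide_eq_true_eq] at hjsel
        obtain ⟨hjlt, hjfresh⟩ := hjsel
        have hfind : (List.range n).find?
            (fun i => ((pvPercent i n : Nat) : Int) == ((pvPercent j n : Nat) : Int)) = some j := by
          rw [find?_range_eq_some]
          refine ⟨hjr, by simp, ?_⟩
          intro i hi
          simpa using fun he => hjfresh i hi (by exact_mod_cast he)
        have hgj : d.get? ((pvPercent j n : Nat) : Int) = some (j : Int) := by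
          rw [hget?, hfind]; rfl
        refine List.mem_map.2 ⟨(((pvPercent j n : Nat) : Int), (j : Int)), ?_, rfl⟩
        refine List.mem_filter.2 ⟨PySem.Dict.mem_items_of_get?_eq_some d hgj, by simpa using hjlt⟩
      · rw [hT, hP]
        intro hv
        obtain ⟨q, hqf, rfl⟩ := List.mem_map.1 hv
        have hq' := (List.mem_filter.1 hqf).1
        have hqlt : q.1 < mc := by simpa using (List.mem_filter.1 hqf).2
        obtain ⟨j, hq2, hjn, hq1, hfr⟩ := hfst q hq'
        rw [hq2]
        refine List.mem_map.2 ⟨j, ?_, rfl⟩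
        refine List.mem_filter.2 ⟨List.mem_range.2 hjn, ?_⟩
        simp only [pvSel, Bool.and_eq_true, decide_eq_true_eq]
        exact ⟨by rw [hq1]; exact hqlt, hfr⟩
    have hperm : T.Perm P := (List.perm_ext_iff_of_nodup hTnodup hPnodup).2 hmem
    have hsorted : PySem.List.sorted P (fun x => x) false = T :=
      PySem.List.sorted_eq_of_perm_of_pairwise_lt P T (fun x => x) hperm hTpair
    rw [hsorted, hT, List.map_map]
    apply List.map_congr_left
    intro j hj
    have hjn : j < n := List.mem_range.1 (List.mem_filter.1 hj).1
    simp [List.getD, PySem.List.pyGet?_natCast]
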